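-- pv_equiv track=rewrite | github.com/Snigelson/pytimex | pytimex/_helpers.py | pack4to3
-- ===== SOURCE A (Python) =====
-- def pack4to3(indata):
-- 	# Add terminating character
-- 	indata.append(0x3f)
--
-- 	# Add padding
-- 	while len(indata)%4:
-- 		indata.append(0x00)
--
-- 	outdata = []
-- 	while len(indata)>0:
-- 		ch1 = indata.pop(0)
-- 		ch2 = indata.pop(0)
-- 		ch3 = indata.pop(0)
-- 		ch4 = indata.pop(0)
--
-- 		outdata.append( ((ch2&0x03)<<6) | (ch1&0x3F) )
-- 		outdata.append( ((ch3&0x0F)<<4) | ((ch2>>2)&0x0F) )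
-- 		outdata.append( ((ch4&0x3F)<<2) | ((ch3&0x30)>>4) )
--
-- 	# Remove zero bytes at end
-- 	while outdata[-1] == 0x00:
-- 		outdata = outdata[:-1]
--
-- 	return outdata
-- ===== SOURCE B (Python) =====
-- def pack4to3(indata):
-- 	# One pass over index groups of 4, then a single backward scan to trim
-- 	# trailing zero bytes. (Reads indata only; does not empty it like A does.)
-- 	data = indata + [0x3f]
-- 	data = data + [0x00] * (-len(data) % 4)
-- 	out = []
-- 	for i in range(0, len(data), 4):
-- 		c1, c2, c3, c4 = data[i:i+4]
-- 		out.append(((c2 & 0x03) << 6) | (c1 & 0x3F))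
-- 		out.append(((c3 & 0x0F) << 4) | ((c2 >> 2) & 0x0F))
-- 		out.append(((c4 & 0x3F) << 2) | ((c3 & 0x30) >> 4))
-- 	n = len(out)
-- 	while n > 0 and out[n-1] == 0x00:
-- 		n -= 1
-- 	return out[:n]
-- ===== Notes on version B (the rewrite author's own statement) =====
-- stated objective: faster
-- what changed: A repeatedly pops from the front of the list (O(n) each) and trims trailing zeros by re-slicing the whole output; B reads the padded input in one indexed pass over groups of 4 and trims with a single backward scan, and it does not mutate the caller's list.
import Mathlib
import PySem

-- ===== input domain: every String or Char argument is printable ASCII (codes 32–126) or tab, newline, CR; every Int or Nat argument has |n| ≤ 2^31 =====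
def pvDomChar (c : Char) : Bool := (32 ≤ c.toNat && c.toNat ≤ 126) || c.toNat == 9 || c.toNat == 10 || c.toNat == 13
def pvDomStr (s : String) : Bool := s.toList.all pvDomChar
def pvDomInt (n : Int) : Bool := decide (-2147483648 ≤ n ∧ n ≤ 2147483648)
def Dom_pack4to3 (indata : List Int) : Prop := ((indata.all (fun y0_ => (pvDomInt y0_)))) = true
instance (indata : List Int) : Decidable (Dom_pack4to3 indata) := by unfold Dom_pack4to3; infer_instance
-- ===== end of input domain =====

-- B replaces A's quadratic pop(0)/slice-copy loops by one index pass over 4-groups and a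
-- single backward trim scan (faster). A empties its argument list in place; B does not
-- mutate it — the equivalence proved here is about the RETURN value only.

-- ===== PORT A =====

-- 'while len(indata)%4: indata.append(0x00)'
def pvPadLoopA (l : List Int) : List Int :=
  if l.length % 4 = 0 then l else pvPadLoopA (l ++ [0x00])
termination_by (4 - l.length % 4) % 4
decreasing_by simp only [List.length_append, List.length_cons, List.length_nil]; omega

-- 'while len(indata)>0: ch1..ch4 = pops; outdata.append(...)×3'
-- (the fallback branch is where Python's pop(0) would raise IndexError; unreachable:
--  the list length is a multiple of 4 when the loop starts)
def pvPackLoopA (indata outdata : List Int) : List Int :=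
  match indata with
  | c1 :: c2 :: c3 :: c4 :: rest =>
      pvPackLoopA rest (outdata ++
        [PySem.Int.bor ((PySem.Int.band c2 0x03) <<< 6) (PySem.Int.band c1 0x3F),
         PySem.Int.bor ((PySem.Int.band c3 0x0F) <<< 4) (PySem.Int.band (c2 >>> 2) 0x0F),
         PySem.Int.bor ((PySem.Int.band c4 0x3F) <<< 2) ((PySem.Int.band c3 0x30) >>> 4)])
  | _ => outdata

-- 'while outdata[-1] == 0x00: outdata = outdata[:-1]'
-- (the 'none' branch is Python's IndexError on an empty list; unreachable here)
def pvTrimLoopA (out : List Int) : List Int :=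
  match h : PySem.List.pyGet? out (-1) with
  | some x => if x = 0 then pvTrimLoopA (PySem.List.slice out none (some (-1))) else out
  | none => out
termination_by out.length
decreasing_by
  rw [PySem.List.slice_to_neg_one]
  have hne : out ≠ [] := by rintro rfl; simp [PySem.List.pyGet?] at h
  have : 0 < out.length := List.length_pos_iff.mpr hne
  simp only [List.length_dropLast]; omega

def pack4to3 (indata : List Int) : List Int :=
  let l := indata ++ [0x3f]
  let l := pvPadLoopA l
  pvTrimLoopA (pvPackLoopA l [])

-- ===== PORT B =====

-- 'c1,c2,c3,c4 = data[i:i+4]; out.append(...)×3' for one i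
-- (the fallback branch is Python's unpacking ValueError; unreachable: len(data)%4 == 0)
def pvGroupB (data : List Int) (i : Int) : List Int :=
  match PySem.List.slice data (some i) (some (i + 4)) with
  | [c1, c2, c3, c4] =>
      [PySem.Int.bor ((PySem.Int.band c2 0x03) <<< 6) (PySem.Int.band c1 0x3F),
       PySem.Int.bor ((PySem.Int.band c3 0x0F) <<< 4) (PySem.Int.band (c2 >>> 2) 0x0F),
       PySem.Int.bor ((PySem.Int.band c4 0x3F) <<< 2) ((PySem.Int.band c3 0x30) >>> 4)]
  | _ => []

-- 'while n > 0 and out[n-1] == 0x00: n -= 1'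
-- (the 'none' branch is Python's IndexError; unreachable while n ≤ len(out))
def pvTrimLenB (out : List Int) (n : Int) : Int :=
  if h : 0 < n then
    match PySem.List.pyGet? out (n - 1) with
    | some x => if x = 0 then pvTrimLenB out (n - 1) else n
    | none => n
  else n
termination_by n.toNat
decreasing_by omega

def pack4to3_alt (indata : List Int) : List Int :=
  let data := indata ++ [0x3f]
  let data := data ++ List.replicate (PySem.Int.mod (-(data.length : Int)) 4).toNat 0x00
  let out := (PySem.List.pyRange 0 (data.length : Int) 4).foldl
    (fun acc i => acc ++ pvGroupB data i) []
  let n := pvTrimLenB out (out.length : Int)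
  PySem.List.slice out none (some n)

-- ===== PRECONDITION & SPEC =====
def Spec_pack4to3 (indata : List Int) (out : List Int) : Prop := out = pack4to3_alt indata
instance (indata : List Int) (out : List Int) : Decidable (Spec_pack4to3 indata out) := by unfold Spec_pack4to3; infer_instance

-- ===== CLAIM (what is proved, stated in full; the proofs are below) =====
def Claim_equal_pack4to3 : Prop := ∀ (indata : List Int), Dom_pack4to3 indata → Spec_pack4to3 indata (pack4to3 indata)

-- ===== LEMMAS AND PROOFS =====

-- the common "pure" chunk pass both loops compute
def pvPackCore : List Int → List Int
  | c1 :: c2 :: c3 :: c4 :: rest =>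
      [PySem.Int.bor ((PySem.Int.band c2 0x03) <<< 6) (PySem.Int.band c1 0x3F),
       PySem.Int.bor ((PySem.Int.band c3 0x0F) <<< 4) (PySem.Int.band (c2 >>> 2) 0x0F),
       PySem.Int.bor ((PySem.Int.band c4 0x3F) <<< 2) ((PySem.Int.band c3 0x30) >>> 4)] ++
      pvPackCore rest
  | _ => []

-- the common "drop trailing zeros" both trims compute
def pvRtrim (l : List Int) : List Int := (l.reverse.dropWhile (fun x => x == 0)).reverse

theorem pvPadLoopA_eq (l : List Int) :
    pvPadLoopA l = l ++ List.replicate ((4 - l.length % 4) % 4) 0x00 := by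
  generalize hm : (4 - l.length % 4) % 4 = m
  induction m using Nat.strong_induction_on generalizing l with
  | _ m ih =>
    by_cases h0 : l.length % 4 = 0
    · rw [pvPadLoopA]; simp [h0]; omega
    · rw [pvPadLoopA]; simp only [h0, if_false]
      have hlt : (4 - (l ++ [0x00]).length % 4) % 4 < m := by
        simp only [List.length_append, List.length_cons, List.length_nil]; omega
      rw [ih _ hlt _ rfl]
      have : m = ((4 - (l ++ [0x00]).length % 4) % 4) + 1 := by
        simp only [List.length_append, List.length_cons, List.length_nil]; omega
      rw [this, List.append_assoc]
      congr 1

theorem pvPackLoopA_acc (l acc : List Int) : pvPackLoopA l acc = acc ++ pvPackCore l := by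
  match l with
  | c1 :: c2 :: c3 :: c4 :: rest =>
      rw [pvPackLoopA, pvPackCore, pvPackLoopA_acc rest, List.append_assoc]
  | [] => rw [pvPackLoopA.eq_def, pvPackCore.eq_def]; simp
  | [a] => rw [pvPackLoopA.eq_def, pvPackCore.eq_def]; simp
  | [a, b] => rw [pvPackLoopA.eq_def, pvPackCore.eq_def]; simp
  | [a, b, c] => rw [pvPackLoopA.eq_def, pvPackCore.eq_def]; simp

theorem pvGroupB_natCast (data : List Int) (n : Nat) :
    pvGroupB data (n : Int) = (match (data.drop n).take 4 with
      | [c1, c2, c3, c4] =>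
          [PySem.Int.bor ((PySem.Int.band c2 0x03) <<< 6) (PySem.Int.band c1 0x3F),
           PySem.Int.bor ((PySem.Int.band c3 0x0F) <<< 4) (PySem.Int.band (c2 >>> 2) 0x0F),
           PySem.Int.bor ((PySem.Int.band c4 0x3F) <<< 2) ((PySem.Int.band c3 0x30) >>> 4)]
      | _ => []) := by
  rw [pvGroupB]
  have : ((n : Int) + 4) = ((n + 4 : Nat) : Int) := by push_cast; ring
  rw [this, PySem.List.slice_natCast]
  have : n + 4 - n = 4 := by omega
  rw [this]

theorem pvChunks_eq (k : Nat) (data : List Int) (h : data.length = 4 * k) :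
    (List.range k).flatMap (fun j => pvGroupB data ((4 * j : Nat) : Int)) = pvPackCore data := by
  induction k generalizing data with
  | zero =>
      have : data = [] := List.eq_nil_of_length_eq_zero (by omega)
      subst this; simp [pvPackCore]
  | succ k ih =>
      match data, h with
      | c1 :: c2 :: c3 :: c4 :: rest, h =>
        have hr : rest.length = 4 * k := by
          simp only [List.length_cons] at h; omega
        rw [List.range_succ_eq_map]
        rw [List.flatMap_cons, List.flatMap_map]
        have h0 : pvGroupB (c1 :: c2 :: c3 :: c4 :: rest) ((4 * 0 : Nat) : Int) =
            [PySem.Int.bor ((PySem.Int.band c2 0x03) <<< 6) (PySem.Int.band c1 0x3F),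
             PySem.Int.bor ((PySem.Int.band c3 0x0F) <<< 4) (PySem.Int.band (c2 >>> 2) 0x0F),
             PySem.Int.bor ((PySem.Int.band c4 0x3F) <<< 2) ((PySem.Int.band c3 0x30) >>> 4)] := by
          rw [pvGroupB_natCast]; rfl
        have hshift : ∀ j : Nat,
            pvGroupB (c1 :: c2 :: c3 :: c4 :: rest) ((4 * (j + 1) : Nat) : Int) =
            pvGroupB rest ((4 * j : Nat) : Int) := by
          intro j
          rw [pvGroupB_natCast, pvGroupB_natCast]
          have : 4 * (j + 1) = (4 * j) + 4 := by ring
          rw [this]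
          simp [List.drop_succ_cons]
        have hfm : List.flatMap
              (fun a : Nat => pvGroupB (c1 :: c2 :: c3 :: c4 :: rest) ((4 * a.succ : Nat) : Int))
              (List.range k) =
            List.flatMap (fun a : Nat => pvGroupB rest ((4 * a : Nat) : Int)) (List.range k) :=
          congrArg (fun f => List.flatMap f (List.range k)) (funext fun j => hshift j)
        rw [h0, hfm, ih rest hr, pvPackCore]

theorem pvRange4_eq (k : Nat) :
    PySem.List.pyRange 0 ((4 * k : Nat) : Int) 4 =
      (List.range k).map (fun j => ((4 * j : Nat) : Int)) := by
  rw [PySem.List.pyRange_of_pos 0 _ (by norm_num)]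
  by_cases hk : k = 0
  · subst hk; simp
  · have hlt : (0 : Int) < ((4 * k : Nat) : Int) := by
      have : 0 < 4 * k := by omega
      exact_mod_cast this
    rw [if_pos hlt]
    have : ((((4 * k : Nat) : Int) - 0 + 4 - 1) / 4).toNat = k := by
      push_cast; omega
    rw [this]
    apply List.map_congr_left
    intro j _
    push_cast; ring

theorem pvTrimLoopA_eq (out : List Int) : pvTrimLoopA out = pvRtrim out := by
  induction out using List.reverseRecOn with
  | nil =>
      rw [pvTrimLoopA]
      split
      · rename_i x h; simp [PySem.List.pyGet?, PySem.List.pyIdx?] at h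
      · simp [pvRtrim]
  | append_singleton l x ih =>
      rw [pvTrimLoopA]
      have hget : PySem.List.pyGet? (l ++ [x]) (-1) = some x := by
        simp [PySem.List.pyGet?, PySem.List.pyIdx?]
      rw [hget]
      simp only []
      by_cases hx : x = 0
      · rw [if_pos hx, PySem.List.slice_to_neg_one, List.dropLast_concat, ih]
        subst hx
        simp [pvRtrim]
      · rw [if_neg hx]
        simp [pvRtrim, hx]

theorem pvRtrim_length_le (l : List Int) : (pvRtrim l).length ≤ l.length := by
  simp only [pvRtrim, List.length_reverse]
  calc (l.reverse.dropWhile (fun x => x == 0)).length ≤ l.reverse.length :=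
        List.length_dropWhile_le _ _
    _ = l.length := List.length_reverse

theorem pvTrimLenB_eq (out : List Int) (n : Nat) (hn : n ≤ out.length) :
    pvTrimLenB out (n : Int) = ((pvRtrim (out.take n)).length : Int) := by
  induction n with
  | zero => rw [pvTrimLenB]; simp [pvRtrim]
  | succ n ih =>
      rw [pvTrimLenB, dif_pos (by omega : (0:Int) < ((n+1 : Nat) : Int))]
      have hlt : n < out.length := by omega
      have h1 : (((n + 1 : Nat) : Int) - 1) = (n : Int) := by push_cast; ring
      have hget : PySem.List.pyGet? out (((n + 1 : Nat) : Int) - 1) = some (out[n]) := by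
        rw [h1, PySem.List.pyGet?_natCast]
        simp [List.getElem?_eq_getElem hlt]
      rw [hget]
      have htake : out.take (n + 1) = out.take n ++ [out[n]] := by
        rw [List.take_succ]
        simp [List.getElem?_eq_getElem hlt]
      split
      · rename_i x hx2
        injection hx2 with h3
        subst h3
        by_cases hx : out[n] = 0
        · rw [if_pos hx, h1, ih (by omega)]
          congr 1
          rw [htake, hx]
          simp [pvRtrim]
        · rw [if_neg hx]
          have h2 : pvRtrim (List.take (n + 1) out) = List.take (n + 1) out := by
            unfold pvRtrim
            rw [htake, List.reverse_append]
            simp only [List.reverse_cons, List.reverse_nil, List.nil_append,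
              List.singleton_append, List.dropWhile_cons]
            rw [if_neg (by simp [hx])]
            rw [List.reverse_cons, List.reverse_reverse]
          rw [h2]
          simp [List.length_take]
          omega
      · rename_i hx2
        simp at hx2

theorem pvRtrim_prefix (l : List Int) : l.take (pvRtrim l).length = pvRtrim l := by
  induction l using List.reverseRecOn with
  | nil => simp [pvRtrim]
  | append_singleton t x ih =>
      by_cases hx : x = 0
      · subst hx
        have h1 : pvRtrim (t ++ [(0:Int)]) = pvRtrim t := by
          simp [pvRtrim]
        rw [h1, List.take_append_of_le_length (pvRtrim_length_le t), ih]
      · have h1 : pvRtrim (t ++ [x]) = t ++ [x] := by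
          simp [pvRtrim, hx]
        rw [h1]; simp

-- ===== VERDICT (by name: the statement is the Claim_ definition above) =====
theorem pack4to3_spec : Claim_equal_pack4to3 := by
  intro indata _
  unfold Spec_pack4to3 pack4to3 pack4to3_alt
  simp only []
  set l0 := indata ++ [0x3f] with hl0
  -- the two padded lists agree
  have hmod : (PySem.Int.mod (-(l0.length : Int)) 4).toNat = (4 - l0.length % 4) % 4 := by
    rw [PySem.Int.mod_eq_emod_of_pos (by norm_num)]
    omega
  rw [hmod, ← pvPadLoopA_eq]
  set data := pvPadLoopA l0 with hdata
  have hlen4 : data.length % 4 = 0 := by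
    rw [hdata, pvPadLoopA_eq]
    simp only [List.length_append, List.length_replicate]
    omega
  obtain ⟨k, hk⟩ : ∃ k, data.length = 4 * k := ⟨data.length / 4, by omega⟩
  -- the two packing loops agree
  have hfold : (PySem.List.pyRange 0 (data.length : Int) 4).foldl
      (fun acc i => acc ++ pvGroupB data i) [] = pvPackCore data := by
    rw [hk, pvRange4_eq, PySem.List.foldl_append_eq_flatMap, List.flatMap_map]
    simpa using pvChunks_eq k data hk
  rw [hfold, pvPackLoopA_acc]
  simp only [List.nil_append]
  set out := pvPackCore data with hout
  -- the two trims agree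
  rw [pvTrimLoopA_eq, pvTrimLenB_eq out out.length le_rfl,
      List.take_of_length_le le_rfl, PySem.List.slice_to_natCast, pvRtrim_prefix]
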